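-- pv_equiv track=rewrite | github.com/diptoe/collective-memory | cm_mcp/tools/identity.py | _match_directory_to_project
-- ===== SOURCE A (Python) =====
-- def _match_directory_to_project(dir_name: str, projects: list) -> dict | None:
--     """
--     Try to match a directory name to a project.
--
--     Matching strategy (in order of confidence):
--     1. Exact match on repository_name (case-insensitive)
--     2. Exact match on project name (case-insensitive)
--     3. Normalized match (replace - with _, etc.)
--
--     Returns the matched project dict or None if no confident match.
--     """
--     if not dir_name or not projects:
--         return None
--
--     dir_lower = dir_name.lower()
--     dir_normalized = dir_lower.replace('-', '_').replace(' ', '_')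
--
--     # First pass: exact match on repository_name
--     for project in projects:
--         repo_name = project.get('repository_name', '')
--         if repo_name and repo_name.lower() == dir_lower:
--             return project
--
--     # Second pass: exact match on project name
--     for project in projects:
--         name = project.get('name', '')
--         if name and name.lower() == dir_lower:
--             return project
--
--     # Third pass: normalized match on repository_name
--     for project in projects:
--         repo_name = project.get('repository_name', '')
--         if repo_name:
--             repo_normalized = repo_name.lower().replace('-', '_').replace(' ', '_')
--             if repo_normalized == dir_normalized:
--                 return project
--
--     # Fourth pass: normalized match on project name
--     for project in projects:
--         name = project.get('name', '')
--         if name: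
--             name_normalized = name.lower().replace('-', '_').replace(' ', '_')
--             if name_normalized == dir_normalized:
--                 return project
--
--     return None
-- ===== SOURCE B (Python) =====
-- def _match_directory_to_project(dir_name: str, projects: list) -> dict | None:
--     """Single pass: give each project a priority (1 repo-exact, 2 name-exact,
--     3 repo-normalized, 4 name-normalized), keep the first project achieving the
--     lowest priority; return immediately on priority 1."""
--     if not dir_name or not projects:
--         return None
--
--     dir_lower = dir_name.lower()
--     dir_normalized = dir_lower.replace('-', '_').replace(' ', '_')
--
--     def norm(s):
--         return s.replace('-', '_').replace(' ', '_')
--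
--     best_pri = 5
--     best = None
--     for project in projects:
--         repo_name = project.get('repository_name', '')
--         name = project.get('name', '')
--         if repo_name and repo_name.lower() == dir_lower:
--             return project  # nothing can beat an earlier repo-exact match
--         elif name and name.lower() == dir_lower:
--             pri = 2
--         elif repo_name and norm(repo_name.lower()) == dir_normalized:
--             pri = 3
--         elif name and norm(name.lower()) == dir_normalized:
--             pri = 4
--         else:
--             continue
--         if pri < best_pri:
--             best_pri = pri
--             best = project
--     return best
-- ===== Notes on version B (the rewrite author's own statement) =====
-- stated objective: simpler
-- what changed: Replaced A's four sequential scans over the project list with a single loop that assigns each project a match priority (repo-exact, name-exact, repo-normalized, name-normalized) and keeps the first project with the lowest priority, returning early on a repo-exact match.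
import Mathlib
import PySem

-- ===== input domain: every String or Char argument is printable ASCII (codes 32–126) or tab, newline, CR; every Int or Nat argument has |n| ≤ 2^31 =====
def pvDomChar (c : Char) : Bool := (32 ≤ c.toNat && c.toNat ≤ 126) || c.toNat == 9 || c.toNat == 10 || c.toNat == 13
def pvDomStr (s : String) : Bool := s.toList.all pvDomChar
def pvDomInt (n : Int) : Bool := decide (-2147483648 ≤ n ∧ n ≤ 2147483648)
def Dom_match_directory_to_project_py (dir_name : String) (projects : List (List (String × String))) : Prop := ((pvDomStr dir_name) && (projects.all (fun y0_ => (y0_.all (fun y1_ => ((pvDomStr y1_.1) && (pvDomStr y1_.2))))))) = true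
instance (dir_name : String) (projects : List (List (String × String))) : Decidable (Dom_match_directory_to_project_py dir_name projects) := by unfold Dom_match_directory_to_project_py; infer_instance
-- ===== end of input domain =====

-- B replaces A's four sequential scans by ONE loop tracking the best match priority; objective: simpler.

-- shared primitives (transliterations of identical Python expressions in Source A and Source B)
-- project.get(k, d) on the dict-as-association-list: first matching key, else default
def pvGetD (p : List (String × String)) (k d : String) : String :=
  match p.find? (fun kv => kv.1 == k) with
  | some kv => kv.2
  | none => d

-- s.replace('-', '_').replace(' ', '_')
def pvNorm (s : String) : String :=
  PySem.Str.replace (PySem.Str.replace s "-" "_") " " "_"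

-- repo_name and repo_name.lower() == dir_lower
def pvC1 (dl : String) (p : List (String × String)) : Bool :=
  let r := pvGetD p "repository_name" ""
  !(r == "") && (PySem.Str.lower r == dl)

-- name and name.lower() == dir_lower
def pvC2 (dl : String) (p : List (String × String)) : Bool :=
  let n := pvGetD p "name" ""
  !(n == "") && (PySem.Str.lower n == dl)

-- repo_name and norm(repo_name.lower()) == dir_normalized
def pvC3 (dn : String) (p : List (String × String)) : Bool :=
  let r := pvGetD p "repository_name" ""
  !(r == "") && (pvNorm (PySem.Str.lower r) == dn)

-- name and norm(name.lower()) == dir_normalized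
def pvC4 (dn : String) (p : List (String × String)) : Bool :=
  let n := pvGetD p "name" ""
  !(n == "") && (pvNorm (PySem.Str.lower n) == dn)

-- ===== PORT A =====
def match_directory_to_project_py (dir_name : String) (projects : List (List (String × String))) : Option (List (String × String)) :=
  if dir_name == "" || projects.isEmpty then none
  else
    let dl := PySem.Str.lower dir_name
    let dn := pvNorm dl
    match projects.find? (pvC1 dl) with
    | some p => some p
    | none =>
      match projects.find? (pvC2 dl) with
      | some p => some p
      | none =>
        match projects.find? (pvC3 dn) with
        | some p => some p
        | none => projects.find? (pvC4 dn)

-- ===== PORT B =====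
-- the single loop of Source B: best-priority accumulator, early return on priority 1
def pvGo (dl dn : String) : List (List (String × String)) → Nat → Option (List (String × String)) → Option (List (String × String))
  | [], _, best => best
  | p :: ps, bestPri, best =>
    if pvC1 dl p then some p
    else
      let q : Nat := if pvC2 dl p then 2 else if pvC3 dn p then 3 else if pvC4 dn p then 4 else 5
      if q < bestPri then pvGo dl dn ps q (some p) else pvGo dl dn ps bestPri best

def match_directory_to_project_py_alt (dir_name : String) (projects : List (List (String × String))) : Option (List (String × String)) :=
  if dir_name == "" || projects.isEmpty then none
  else
    let dl := PySem.Str.lower dir_name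
    let dn := pvNorm dl
    pvGo dl dn projects 5 none

-- ===== PRECONDITION & SPEC =====
def Spec_match_directory_to_project_py (dir_name : String) (projects : List (List (String × String))) (out : Option (List (String × String))) : Prop := out = match_directory_to_project_py_alt dir_name projects
instance (dir_name : String) (projects : List (List (String × String))) (out : Option (List (String × String))) : Decidable (Spec_match_directory_to_project_py dir_name projects out) := by unfold Spec_match_directory_to_project_py; infer_instance

-- ===== CLAIM (what is proved, stated in full; the proofs are below) =====
def Claim_equal_match_directory_to_project_py : Prop := ∀ (dir_name : String) (projects : List (List (String × String))), Dom_match_directory_to_project_py dir_name projects → Spec_match_directory_to_project_py dir_name projects (match_directory_to_project_py dir_name projects)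

-- ===== LEMMAS AND PROOFS =====

theorem pvFindNoneCons {a : Type} (p : a → Bool) (x : a) (xs : List a)
    (h : (x :: xs).find? p = none) : p x = false ∧ xs.find? p = none := by
  cases hpx : p x with
  | true => simp [hpx] at h
  | false => exact ⟨rfl, by simpa [List.find?_cons, hpx] using h⟩

-- an early repo-exact match is returned regardless of the accumulator
theorem pvGo_of_find_c1 (dl dn : String) (ps : List (List (String × String))) (p : List (String × String))
    (h : ps.find? (pvC1 dl) = some p) :
    ∀ pri best, pvGo dl dn ps pri best = some p := by
  induction ps with
  | nil => simp at h
  | cons x xs ih =>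
    intro pri best
    cases h1 : pvC1 dl x with
    | true =>
      have hx : x = p := by simpa [List.find?_cons, h1] using h
      subst hx
      simp [pvGo, h1]
    | false =>
      have hrest : xs.find? (pvC1 dl) = some p := by simpa [List.find?_cons, h1] using h
      simp only [pvGo, h1, Bool.false_eq_true, if_false]
      by_cases hq : (if pvC2 dl x then 2 else if pvC3 dn x then 3 else if pvC4 dn x then 4 else 5) < pri
      · rw [if_pos hq]; exact ih hrest _ _
      · rw [if_neg hq]; exact ih hrest _ _

-- once the best priority is 2 and no repo-exact match remains, the accumulator wins
theorem pvGo_two (dl dn : String) (ps : List (List (String × String))) (b : List (String × String))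
    (h : ps.find? (pvC1 dl) = none) :
    pvGo dl dn ps 2 (some b) = some b := by
  induction ps generalizing b with
  | nil => simp [pvGo]
  | cons x xs ih =>
    obtain ⟨h1, hrest⟩ := pvFindNoneCons _ _ _ h
    simp only [pvGo, h1, Bool.false_eq_true, if_false]
    have hq : ¬ ((if pvC2 dl x then 2 else if pvC3 dn x then 3 else if pvC4 dn x then 4 else 5) < 2) := by
      split
      · omega
      · split
        · omega
        · split <;> omega
    rw [if_neg hq]
    exact ih _ hrest

-- at priority 3 only a name-exact match can still improve the accumulator
theorem pvGo_three (dl dn : String) (ps : List (List (String × String))) (b : List (String × String))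
    (h : ps.find? (pvC1 dl) = none) :
    pvGo dl dn ps 3 (some b) =
      (match ps.find? (pvC2 dl) with
       | some p => some p
       | none => some b) := by
  induction ps generalizing b with
  | nil => simp [pvGo]
  | cons x xs ih =>
    obtain ⟨h1, hrest⟩ := pvFindNoneCons _ _ _ h
    simp only [pvGo, h1, Bool.false_eq_true, if_false, List.find?_cons]
    cases h2 : pvC2 dl x with
    | true =>
      simp only [if_true]
      rw [if_pos (by omega)]
      exact pvGo_two dl dn xs x hrest
    | false =>
      simp only [Bool.false_eq_true, if_false]
      have hq : ¬ ((if pvC3 dn x then 3 else if pvC4 dn x then 4 else 5) < 3) := by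
        split
        · omega
        · split <;> omega
      rw [if_neg hq]
      exact ih _ hrest

-- at priority 4, name-exact then repo-normalized matches can improve the accumulator
theorem pvGo_four (dl dn : String) (ps : List (List (String × String))) (b : List (String × String))
    (h : ps.find? (pvC1 dl) = none) :
    pvGo dl dn ps 4 (some b) =
      (match ps.find? (pvC2 dl) with
       | some p => some p
       | none =>
         match ps.find? (pvC3 dn) with
         | some p => some p
         | none => some b) := by
  induction ps generalizing b with
  | nil => simp [pvGo]
  | cons x xs ih =>
    obtain ⟨h1, hrest⟩ := pvFindNoneCons _ _ _ h
    simp only [pvGo, h1, Bool.false_eq_true, if_false, List.find?_cons]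
    cases h2 : pvC2 dl x with
    | true =>
      simp only [if_true]
      rw [if_pos (by omega)]
      exact pvGo_two dl dn xs x hrest
    | false =>
      simp only [Bool.false_eq_true, if_false]
      cases h3 : pvC3 dn x with
      | true =>
        simp only [if_true]
        rw [if_pos (by omega)]
        exact pvGo_three dl dn xs x hrest
      | false =>
        simp only [Bool.false_eq_true, if_false]
        have hq : ¬ ((if pvC4 dn x then 4 else 5) < 4) := by split <;> omega
        rw [if_neg hq]
        exact ih _ hrest

-- the full loop starting empty equals the last three passes of A (when pass 1 finds nothing)
theorem pvGo_five (dl dn : String) (ps : List (List (String × String)))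
    (h : ps.find? (pvC1 dl) = none) :
    pvGo dl dn ps 5 none =
      (match ps.find? (pvC2 dl) with
       | some p => some p
       | none =>
         match ps.find? (pvC3 dn) with
         | some p => some p
         | none => ps.find? (pvC4 dn)) := by
  induction ps with
  | nil => simp [pvGo]
  | cons x xs ih =>
    obtain ⟨h1, hrest⟩ := pvFindNoneCons _ _ _ h
    simp only [pvGo, h1, Bool.false_eq_true, if_false, List.find?_cons]
    cases h2 : pvC2 dl x with
    | true =>
      simp only [if_true]
      rw [if_pos (by omega)]
      exact pvGo_two dl dn xs x hrest
    | false =>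
      simp only [Bool.false_eq_true, if_false]
      cases h3 : pvC3 dn x with
      | true =>
        simp only [if_true]
        rw [if_pos (by omega)]
        exact pvGo_three dl dn xs x hrest
      | false =>
        simp only [Bool.false_eq_true, if_false]
        cases h4 : pvC4 dn x with
        | true =>
          simp only [if_true]
          rw [if_pos (by omega)]
          exact pvGo_four dl dn xs x hrest
        | false =>
          simp only [Bool.false_eq_true, if_false]
          rw [if_neg (by omega)]
          exact ih hrest

-- ===== VERDICT (by name: the statement is the Claim_ definition above) =====
theorem match_directory_to_project_py_spec : Claim_equal_match_directory_to_project_py := by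
  intro dir_name projects _
  unfold Spec_match_directory_to_project_py match_directory_to_project_py match_directory_to_project_py_alt
  by_cases hg : (dir_name == "" || projects.isEmpty) = true
  · simp [hg]
  · simp only [hg, Bool.false_eq_true, if_false]
    cases hf : projects.find? (pvC1 (PySem.Str.lower dir_name)) with
    | some p => exact (pvGo_of_find_c1 _ _ _ _ hf _ _).symm
    | none => exact (pvGo_five _ _ _ hf).symm
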